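-- pv_equiv track=rewrite | github.com/omshri22121999/code-hub | My-Codes/amex-test/test1.py | solution
-- ===== SOURCE A (Python) =====
-- def solution(S):
--     dels = 0
--     l = [0] * 26
--
--     for i in S:
--         l[int(ord(i) - ord("a"))] += 1
--
--     l.sort(reverse=True)
--
--     for i in range(1, len(l)):
--         while l[i] >= l[i - 1] and l[i] > 0:
--             l[i] -= 1
--             dels += 1
--
--     return dels
-- ===== SOURCE B (Python) =====
-- def solution(S):
--     freq = [0] * 26
--     for c in S:
--         freq[ord(c) - 97] += 1
--     freq.sort(reverse=True)
--     dels = 0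
--     prev = None
--     for f in freq:
--         keep = f if prev is None else min(f, max(prev - 1, 0))
--         dels += f - keep
--         prev = keep
--     return dels
-- ===== Notes on version B (the rewrite author's own statement) =====
-- stated objective: simpler
-- what changed: B replaces A's unit-by-unit decrementing inner while loop and in-place array rewriting by a single mutation-free fold that computes each kept frequency in closed form (keep = min(f, max(prev-1, 0))) while threading the previous kept value.
import Mathlib
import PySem

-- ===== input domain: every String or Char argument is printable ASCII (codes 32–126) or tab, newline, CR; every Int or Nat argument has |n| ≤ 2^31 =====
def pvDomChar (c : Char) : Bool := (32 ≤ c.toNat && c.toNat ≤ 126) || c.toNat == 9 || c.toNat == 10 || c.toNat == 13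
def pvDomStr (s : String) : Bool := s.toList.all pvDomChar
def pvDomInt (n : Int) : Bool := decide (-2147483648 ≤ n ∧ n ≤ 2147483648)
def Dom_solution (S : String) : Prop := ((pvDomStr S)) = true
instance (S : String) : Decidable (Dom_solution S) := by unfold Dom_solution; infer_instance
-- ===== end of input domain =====

-- B replaces A's unit-by-unit decrement while-loop and in-place array rewriting by one
-- mutation-free fold computing each kept frequency in closed form (objective: simpler).

-- ===== PORT A =====
-- for i in S: l[ord(i)-ord('a')] += 1   (explicit recursion over the characters)
def countA : List Char → List Int → List Int
  | [], l => l
  | c :: cs, l =>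
      countA cs (PySem.List.pySetD l ((c.toNat : Int) - 97)
                  (PySem.List.pyGetD l ((c.toNat : Int) - 97) 0 + 1))

-- while l[i] >= l[i-1] and l[i] > 0: l[i] -= 1; dels += 1   (li = l[i], prev = l[i-1])
def whileA (li prev dels : Int) : Int × Int :=
  if li ≥ prev ∧ li > 0 then whileA (li - 1) prev (dels + 1) else (li, dels)
termination_by li.toNat
decreasing_by omega

def solution (S : String) : Int :=
  let l0 := countA S.toList (List.replicate 26 (0 : Int))
  let l1 := PySem.List.sorted l0 (fun x => x) true
  let res := (PySem.List.pyRange 1 (PySem.List.len l1) 1).foldl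
    (fun (st : List Int × Int) i =>
      let p := whileA (PySem.List.pyGetD st.1 i 0) (PySem.List.pyGetD st.1 (i - 1) 0) st.2
      (PySem.List.pySetD st.1 i p.1, p.2)) (l1, 0)
  res.2

-- ===== PORT B =====
def solution_alt (S : String) : Int :=
  let freq := S.toList.foldl
    (fun l c => PySem.List.pySetD l ((c.toNat : Int) - 97)
                  (PySem.List.pyGetD l ((c.toNat : Int) - 97) 0 + 1))
    (List.replicate 26 (0 : Int))
  (((PySem.List.sorted freq (fun x => x) true).foldl
    (fun (st : Option Int × Int) f =>
      let keep := match st.1 with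
        | none => f
        | some p => min f (max (p - 1) 0)
      (some keep, st.2 + (f - keep))) (none, 0))).2

-- ===== PRECONDITION & SPEC =====
-- Pre_ excludes exactly the strings containing a character of code < 71 or > 122, on which
-- A (and B alike) raises IndexError in `l[ord(i)-ord("a")] += 1`; A returns on all of Pre_.
def Pre_solution (S : String) : Prop := (S.toList.all fun c => decide (71 ≤ c.toNat ∧ c.toNat ≤ 122)) = true
instance (S : String) : Decidable (Pre_solution S) := by unfold Pre_solution; infer_instance

def pvWitness_solution : String := "ab"

def Spec_solution (S : String) (out : Int) : Prop := out = solution_alt S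
instance (S : String) (out : Int) : Decidable (Spec_solution S out) := by unfold Spec_solution; infer_instance

-- ===== CLAIM (what is proved, stated in full; the proofs are below) =====
def Claim_equal_solution : Prop := ∀ (S : String), Dom_solution S → Pre_solution S → Spec_solution S (solution S)

-- ===== LEMMAS AND PROOFS =====

-- deletions of the cap-chain greedy starting from previous kept value p
def chain (p : Int) : List Int → Int
  | [] => 0
  | f :: fs => (f - min f (max (p - 1) 0)) + chain (min f (max (p - 1) 0)) fs

theorem countA_eq_foldl (cs : List Char) (l : List Int) :
    countA cs l = cs.foldl
      (fun l c => PySem.List.pySetD l ((c.toNat : Int) - 97)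
                    (PySem.List.pyGetD l ((c.toNat : Int) - 97) 0 + 1)) l := by
  induction cs generalizing l with
  | nil => rfl
  | cons c cs ih => simp [countA, List.foldl, ih]

theorem length_countA (cs : List Char) (l : List Int) :
    (countA cs l).length = l.length := by
  induction cs generalizing l with
  | nil => rfl
  | cons c cs ih => simp [countA, ih, PySem.List.length_pySetD]

theorem mem_pySetD {l : List Int} {i : Int} {v x : Int}
    (hx : x ∈ PySem.List.pySetD l i v) : x ∈ l ∨ x = v := by
  unfold PySem.List.pySetD PySem.List.pySet? at hx
  cases h : PySem.List.pyIdx? l.length i with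
  | none => rw [h] at hx; simp at hx; exact Or.inl hx
  | some k => rw [h] at hx; simp at hx; exact List.mem_or_eq_of_mem_set hx

theorem pyGetD_nonneg {l : List Int} {i : Int} (hl : ∀ x ∈ l, 0 ≤ x) :
    0 ≤ PySem.List.pyGetD l i 0 := by
  by_cases h : PySem.Raise.InRange l.length i
  · exact hl _ (PySem.List.pyGetD_mem l 0 h)
  · unfold PySem.List.pyGetD
    rw [(PySem.List.pyGet?_eq_none_iff _ _).2 h]
    simp

theorem countA_nonneg (cs : List Char) (l : List Int) (hl : ∀ x ∈ l, 0 ≤ x) :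
    ∀ x ∈ countA cs l, 0 ≤ x := by
  induction cs generalizing l with
  | nil => exact hl
  | cons c cs ih =>
      refine ih _ (fun x hx => ?_)
      rcases mem_pySetD hx with h | h
      · exact hl _ h
      · have := pyGetD_nonneg (l := l) (i := (c.toNat : Int) - 97) hl
        omega

theorem whileA_eq (li prev dels : Int) (h : 0 ≤ li) :
    whileA li prev dels
      = (min li (max (prev - 1) 0), dels + (li - min li (max (prev - 1) 0))) := by
  revert h
  fun_induction whileA li prev dels with
  | case1 li dels hc ih =>
      intro h
      rw [ih (by omega)]
      simp only [Prod.mk.injEq]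
      constructor <;> omega
  | case2 li dels hc =>
      intro h
      simp only [Prod.mk.injEq]
      constructor <;> omega

-- B's fold equals `chain` once the first element has been consumed
theorem foldB_eq_chain (xs : List Int) (p d : Int) :
    ((xs.foldl
      (fun (st : Option Int × Int) f =>
        (some (match st.1 with
               | none => f
               | some q => min f (max (q - 1) 0)),
         st.2 + (f - match st.1 with
                     | none => f
                     | some q => min f (max (q - 1) 0)))) (some p, d))).2
      = d + chain p xs := by
  induction xs generalizing p d with
  | nil => simp [chain]
  | cons f fs ih => simp only [List.foldl_cons, ih, chain]; ring

theorem foldB_cons (h : Int) (t : List Int) :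
    (((h :: t).foldl
      (fun (st : Option Int × Int) f =>
        (some (match st.1 with
               | none => f
               | some q => min f (max (q - 1) 0)),
         st.2 + (f - match st.1 with
                     | none => f
                     | some q => min f (max (q - 1) 0)))) (none, 0))).2
      = chain h t := by
  simp only [List.foldl_cons, foldB_eq_chain]
  simp

-- A's indexed pass from position k equals `chain` seeded with l[k-1]
theorem foldA_eq_chain (n : Nat) : ∀ (l : List Int) (k : Nat) (d : Int),
    l.length = 26 → 1 ≤ k → n = 26 - k → (∀ x ∈ l, 0 ≤ x) →
    ((PySem.List.pyRange (k : Int) 26 1).foldl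
      (fun (st : List Int × Int) i =>
        (PySem.List.pySetD st.1 i
          (whileA (PySem.List.pyGetD st.1 i 0) (PySem.List.pyGetD st.1 (i - 1) 0) st.2).1,
         (whileA (PySem.List.pyGetD st.1 i 0) (PySem.List.pyGetD st.1 (i - 1) 0) st.2).2))
      (l, d)).2
      = d + chain (l[k - 1]?.getD 0) (l.drop k) := by
  induction n with
  | zero =>
      intro l k d hlen hk hn hpos
      have hk26 : 26 ≤ k := by omega
      rw [PySem.List.pyRange_one_eq_nil (by exact_mod_cast hk26)]
      rw [List.drop_eq_nil_of_le (by omega)]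
      simp [chain]
  | succ m ih =>
      intro l k d hlen hk hn hpos
      have hklt : k < 26 := by omega
      have hkl : k < l.length := by omega
      rw [PySem.List.pyRange_one_cons (by exact_mod_cast hklt)]
      rw [List.foldl_cons]
      have hcur : PySem.List.pyGetD l (k : Int) 0 = l[k] := by
        rw [PySem.List.pyGetD_natCast]; simp [List.getD, hkl]
      have hk1 : ((k : Int) - 1) = ((k - 1 : Nat) : Int) := by omega
      have hprev : PySem.List.pyGetD l ((k : Int) - 1) 0 = l[k - 1]?.getD 0 := by
        rw [hk1, PySem.List.pyGetD_natCast]; simp [List.getD]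
      set prev := l[k - 1]?.getD 0 with hprevdef
      set keep := min l[k] (max (prev - 1) 0) with hkeep
      have hw : whileA (PySem.List.pyGetD l (k : Int) 0) (PySem.List.pyGetD l ((k : Int) - 1) 0) d
          = (keep, d + (l[k] - keep)) := by
        rw [hcur, hprev, whileA_eq _ _ _ (hpos _ (List.getElem_mem hkl))]
      simp only [hw, PySem.List.pySetD_natCast]
      have hlen' : (l.set k keep).length = 26 := by simp [hlen]
      have hpos' : ∀ x ∈ l.set k keep, 0 ≤ x := by
        intro x hx
        rcases List.mem_or_eq_of_mem_set hx with h | h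
        · exact hpos _ h
        · have h0 : 0 ≤ l[k] := hpos _ (List.getElem_mem hkl)
          omega
      have hstep : ((k : Int) + 1) = ((k + 1 : Nat) : Int) := by omega
      rw [hstep, ih (l.set k keep) (k + 1) (d + (l[k] - keep)) hlen' (by omega) (by omega) hpos']
      have hget : (l.set k keep)[(k + 1) - 1]?.getD 0 = keep := by
        simp [List.getElem?_set_self hkl]
      have hdrop : (l.set k keep).drop (k + 1) = l.drop (k + 1) := by
        rw [List.drop_set]; simp
      rw [hget, hdrop]
      rw [List.drop_eq_getElem_cons hkl]
      simp only [chain, ← hkeep]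
      ring

-- ===== VERDICT (by name: the statement is the Claim_ definition above) =====
theorem solution_spec : Claim_equal_solution := by
  intro S _ _
  unfold Spec_solution solution solution_alt
  simp only [← countA_eq_foldl]
  set l0 := countA S.toList (List.replicate 26 (0 : Int)) with hl0
  set l1 := PySem.List.sorted l0 (fun x => x) true with hl1
  have hlen0 : l0.length = 26 := by
    rw [hl0, length_countA]; simp
  have hlen : l1.length = 26 := by rw [hl1, PySem.List.length_sorted]; exact hlen0
  have hpos : ∀ x ∈ l1, 0 ≤ x := by
    intro x hx
    rw [hl1, PySem.List.mem_sorted] at hx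
    exact countA_nonneg _ _ (by simp) _ hx
  have hlenI : PySem.List.len l1 = (26 : Int) := by
    rw [PySem.List.len_eq, hlen]; rfl
  rw [hlenI]
  obtain ⟨h, t, hht⟩ := List.exists_cons_of_ne_nil
    (show l1 ≠ [] by intro hnil; rw [hnil] at hlen; simp at hlen)
  have HA := foldA_eq_chain 25 l1 1 0 hlen (by omega) (by omega) hpos
  rw [Nat.cast_one] at HA
  rw [HA, hht, foldB_cons]
  norm_num
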